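-- pv_equiv track=rewrite | github.com/SonnyBurnett/codechallenge | JuanMiguelEstrella_041/euler_041.py | is_digits_unique
-- ===== SOURCE A (Python) =====
-- def is_digits_unique(n):
--     found_flag = [False, False, False, False, False, False, False, False, False, False]
--     for c in str(n):
--         if found_flag[int(c)]:
--             return False
--         else:
--             found_flag[int(c)] = True
--
--     return True
-- ===== SOURCE B (Python) =====
-- def is_digits_unique(n):
--     digits = [int(c) for c in str(n)]
--     return len(set(digits)) == len(digits)
-- ===== Notes on version B (the rewrite author's own statement) =====
-- stated objective: simpler
-- what changed: Replaces the early-exit scan with a mutable boolean flag table by a single comprehension building the digit list and one cardinality comparison len(set(digits)) == len(digits): no loop control flow, no early return, no flag table.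
import Mathlib
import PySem

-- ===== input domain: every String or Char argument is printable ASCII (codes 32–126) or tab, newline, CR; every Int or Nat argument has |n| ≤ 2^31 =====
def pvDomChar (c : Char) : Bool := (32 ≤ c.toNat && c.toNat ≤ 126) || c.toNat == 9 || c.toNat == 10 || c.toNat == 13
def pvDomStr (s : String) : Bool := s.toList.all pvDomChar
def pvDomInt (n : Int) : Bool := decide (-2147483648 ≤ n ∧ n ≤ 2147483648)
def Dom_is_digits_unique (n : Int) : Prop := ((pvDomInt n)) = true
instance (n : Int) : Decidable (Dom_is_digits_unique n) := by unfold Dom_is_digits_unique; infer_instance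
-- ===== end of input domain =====

-- B replaces A's early-exit scan over a mutable 10-slot flag table by building the digit
-- list once and comparing len(set(digits)) with len(digits) (objective: simpler).

-- ===== PORT A =====
-- int(c) for a single character c; none = ValueError ('-' of a negative n), excluded by Pre_
def pyDigitA (c : Char) : Option Int := PySem.Int.ofChars? [c]

-- A's for-loop: flags is found_flag; some false = early `return False`, none = a raise
def isduLoop : List Bool → List Char → Option Bool
  | _, [] => some true
  | flags, c :: cs =>
    match pyDigitA c with
    | none => none                                   -- int(c) raises ValueError
    | some d =>
      match PySem.List.pyGet? flags d with
      | none => none                                 -- IndexError (unreachable on digit chars)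
      | some true => some false                      -- return False
      | some false => isduLoop (PySem.List.pySetD flags d true) cs

-- .getD false only covers the raising case, which Pre_ (0 ≤ n) excludes
def is_digits_unique (n : Int) : Bool :=
  (isduLoop [false, false, false, false, false, false, false, false, false, false]
    (PySem.Int.toChars n)).getD false

-- ===== PORT B =====
-- int(c) in B's comprehension; the .getD 0 total form only covers ValueError, excluded by Pre_
def pyDigitB (c : Char) : Int := (PySem.Int.ofChars? [c]).getD 0

def is_digits_unique_alt (n : Int) : Bool :=
  let digits := (PySem.Int.toChars n).map pyDigitB
  decide ((PySem.Set.ofList digits).length = digits.length)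

-- ===== PRECONDITION & SPEC =====
-- Pre_ excludes negative n, on which str(n) starts with '-' and int('-') raises ValueError in both A and B
def Pre_is_digits_unique (n : Int) : Prop := 0 ≤ n
instance (n : Int) : Decidable (Pre_is_digits_unique n) := by unfold Pre_is_digits_unique; infer_instance
def pvWitness_is_digits_unique : Int := (1023)

def Spec_is_digits_unique (n : Int) (out : Bool) : Prop := out = is_digits_unique_alt n
instance (n : Int) (out : Bool) : Decidable (Spec_is_digits_unique n out) := by unfold Spec_is_digits_unique; infer_instance

-- ===== CLAIM (what is proved, stated in full; the proofs are below) =====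
def Claim_equal_is_digits_unique : Prop := ∀ (n : Int), Dom_is_digits_unique n → Pre_is_digits_unique n → Spec_is_digits_unique n (is_digits_unique n)

-- ===== LEMMAS AND PROOFS =====

-- a character produced by decimal printing
def IsDig (c : Char) : Prop := ∃ k, k < 10 ∧ c = Nat.digitChar k

theorem toDigitsCore_digs (fuel : Nat) : ∀ (n : Nat) (ds : List Char),
    (∀ c ∈ ds, IsDig c) → ∀ c ∈ Nat.toDigitsCore 10 fuel n ds, IsDig c := by
  induction fuel with
  | zero => intro n ds h; simpa [Nat.toDigitsCore] using h
  | succ fuel ih =>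
    intro n ds h c hc
    have hd : IsDig ((n % 10).digitChar) := ⟨n % 10, Nat.mod_lt _ (by omega), rfl⟩
    have h' : ∀ x ∈ (n % 10).digitChar :: ds, IsDig x := by
      intro x hx
      rcases List.mem_cons.mp hx with rfl | hx
      · exact hd
      · exact h _ hx
    simp only [Nat.toDigitsCore] at hc
    split at hc
    · exact h' _ hc
    · exact ih _ _ h' _ hc

theorem toChars_digs (n : Int) (hn : 0 ≤ n) : ∀ c ∈ PySem.Int.toChars n, IsDig c := by
  have : ¬ n < 0 := by omega
  simpa [PySem.Int.toChars, this, Nat.toDigits] using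
    toDigitsCore_digs (n.toNat + 1) n.toNat [] (by simp)

theorem ofChars?_digitChar : ∀ k, k < 10 → PySem.Int.ofChars? [Nat.digitChar k] = some (k : Int) := by
  decide

-- the flag table describing a set S of already-seen digit values
def flagsOf (S : List Int) : List Bool := (List.range 10).map (fun (i : Nat) => decide ((i : Int) ∈ S))

theorem length_flagsOf (S : List Int) : (flagsOf S).length = 10 := by
  simp [flagsOf]

theorem flagsOf_getElem (S : List Int) (i : Nat) (h : i < (flagsOf S).length) :
    (flagsOf S)[i] = decide ((i : Int) ∈ S) := by
  unfold flagsOf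
  rw [List.getElem_map, List.getElem_range]

theorem flagsOf_set (S : List Int) (k : Nat) (hk : k < 10) :
    (flagsOf S).set k true = flagsOf ((k : Int) :: S) := by
  apply List.ext_getElem
  · simp [flagsOf]
  · intro i h1 h2
    have hi : i < (flagsOf S).length := by simpa using h1
    rw [List.getElem_set, flagsOf_getElem _ _ h2]
    by_cases hik : i = k
    · subst hik; simp
    · have hik' : (i : Int) ≠ (k : Int) := by exact_mod_cast hik
      rw [if_neg (fun he => hik he.symm), flagsOf_getElem _ _ hi]
      simp [hik']

theorem isduLoop_spec (cs : List Char) : ∀ (S : List Int), (∀ c ∈ cs, IsDig c) →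
    isduLoop (flagsOf S) cs =
      some (decide ((cs.map pyDigitB).Nodup ∧ ∀ d ∈ cs.map pyDigitB, d ∉ S)) := by
  induction cs with
  | nil => intro S _; simp [isduLoop]
  | cons c cs ih =>
    intro S h
    obtain ⟨k, hk, rfl⟩ := h c (by simp)
    have hofc := ofChars?_digitChar k hk
    have hdigB : pyDigitB (Nat.digitChar k) = (k : Int) := by simp [pyDigitB, hofc]
    have hklen : k < (flagsOf S).length := by rw [length_flagsOf]; exact hk
    have hget : PySem.List.pyGet? (flagsOf S) ((k : Nat) : Int) = some (decide ((k : Int) ∈ S)) := by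
      rw [PySem.List.pyGet?_natCast, List.getElem?_eq_getElem hklen, flagsOf_getElem _ _ hklen]
    by_cases hmem : (k : Int) ∈ S
    · simp only [isduLoop, pyDigitA, hofc, hget, hmem, decide_true]
      simp [hdigB, hmem]
    · have hset : PySem.List.pySetD (flagsOf S) ((k : Nat) : Int) true = flagsOf ((k : Int) :: S) := by
        rw [PySem.List.pySetD_natCast, flagsOf_set S k hk]
      simp only [isduLoop, pyDigitA, hofc, hget, hmem, decide_false]
      rw [hset, ih _ (fun c hc => h c (by simp [hc]))]
      congr 1
      rw [decide_eq_decide]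
      simp only [List.map_cons, hdigB, List.nodup_cons, List.mem_cons]
      constructor
      · rintro ⟨hnd, hall⟩
        refine ⟨⟨fun hin => hall _ hin (Or.inl rfl), hnd⟩, fun d hd => ?_⟩
        rcases hd with rfl | hd'
        · exact hmem
        · exact fun hS => hall d hd' (Or.inr hS)
      · rintro ⟨⟨hnotin, hnd⟩, hall⟩
        refine ⟨hnd, fun d hd hc => ?_⟩
        rcases hc with rfl | hdS
        · exact hnotin hd
        · exact hall d (Or.inr hd) hdS

theorem len_ofList_eq_iff (xs : List Int) :
    (PySem.Set.ofList xs).length = xs.length ↔ xs.Nodup := by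
  have hperm : (PySem.Set.ofList xs).Perm xs.dedup := by
    refine (List.perm_ext_iff_of_nodup (PySem.Set.nodup_ofList xs) (List.nodup_dedup xs)).mpr ?_
    intro a; rw [PySem.Set.mem_ofList, List.mem_dedup]
  rw [hperm.length_eq]
  constructor
  · intro h
    exact List.dedup_eq_self.mp ((xs.dedup_sublist).eq_of_length h)
  · intro h
    rw [List.dedup_eq_self.mpr h]

-- ===== VERDICT (by name: the statement is the Claim_ definition above) =====
theorem is_digits_unique_spec : Claim_equal_is_digits_unique := by
  intro n _ hpre
  unfold Spec_is_digits_unique is_digits_unique is_digits_unique_alt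
  have hdigs := toChars_digs n hpre
  have hinit : [false, false, false, false, false, false, false, false, false, false]
      = flagsOf [] := by decide
  rw [hinit, isduLoop_spec (PySem.Int.toChars n) [] hdigs]
  have hlen := len_ofList_eq_iff ((PySem.Int.toChars n).map pyDigitB)
  rw [List.length_map] at hlen
  simp [← hlen]
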